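-- pv_equiv track=rewrite | github.com/pypi-data/pypi-mirror-389 | packages/lynecode/lynecode-0.3.1-py3-none-any.whl/tool/grep.py | smart_pattern_handling
-- ===== SOURCE A (Python) =====
-- def escape_regex_pattern(pattern: str) -> str:
--     """Escape special regex characters for literal string matching"""
--     special_chars = r'[.*+?^${}()|[\]\\]'
--     escaped_pattern = ''
--     i = 0
--     while i < len(pattern):
--         if pattern[i] == '\\' and i + 1 < len(pattern):
--
--             escaped_pattern += pattern[i:i+2]
--             i += 2
--         elif pattern[i] in special_chars:
--             escaped_pattern += '\\' + pattern[i]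
--             i += 1
--         else:
--             escaped_pattern += pattern[i]
--             i += 1
--     return escaped_pattern
--
-- def smart_pattern_handling(pattern: str) -> tuple[str, bool]:
--     """Smart pattern handling - detect if user wants literal or regex search"""
--
--     regex_chars = r'[.*+?^${}()|[\]\\]'
--     has_regex_chars = any(char in pattern for char in regex_chars)
--
--     if pattern.startswith('/') and pattern.endswith('/') and len(pattern) > 2:
--         return pattern[1:-1], True
--
--     if has_regex_chars:
--         return pattern, True
--
--     return escape_regex_pattern(pattern), False
-- ===== SOURCE B (Python) =====
-- def smart_pattern_handling(pattern: str) -> tuple[str, bool]: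
--     """Smart pattern handling - detect if user wants literal or regex search.
--
--     Simpler equivalent of A: the slash-delimited form wins first; otherwise the
--     pattern is regex iff it contains a special regex character; the escape loop
--     of A is a no-op on patterns without special characters, so it is dropped.
--     """
--     if len(pattern) > 2 and pattern[0] == '/' and pattern[-1] == '/':
--         return pattern[1:-1], True
--     if any(c in '[.*+?^${}()|\\]' for c in pattern):
--         return pattern, True
--     return pattern, False
-- ===== Notes on version B (the rewrite author's own statement) =====
-- stated objective: simpler
-- what changed: B drops A's escape_regex_pattern while-loop entirely (it is provably the identity on the only patterns that reach it, since they contain no special character and no backslash) and flips the membership scan: instead of testing each of the 18 special characters for substring occurrence in the pattern, B scans the pattern once testing each character against the 14 distinct special characters; the slash-delimited check uses direct indexing instead of startswith/endswith.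
import Mathlib
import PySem

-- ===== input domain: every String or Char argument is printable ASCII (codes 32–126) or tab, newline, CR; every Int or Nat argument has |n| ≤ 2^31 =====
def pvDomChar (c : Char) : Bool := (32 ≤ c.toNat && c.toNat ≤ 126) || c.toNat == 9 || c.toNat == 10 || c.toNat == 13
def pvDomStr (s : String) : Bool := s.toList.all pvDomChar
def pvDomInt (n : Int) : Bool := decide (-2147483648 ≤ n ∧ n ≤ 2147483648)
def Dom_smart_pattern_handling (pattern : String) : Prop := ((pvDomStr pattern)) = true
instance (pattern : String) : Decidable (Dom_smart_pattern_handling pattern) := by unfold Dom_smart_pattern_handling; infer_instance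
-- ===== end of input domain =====

-- B drops A's escape loop (a provable no-op on the patterns that reach it) and scans the
-- pattern once against the distinct special characters; objective: simpler.

-- ===== PORT A =====
-- the raw-string constant r'[.*+?^${}()|[\]\\]' of A, as its character list (Python iterates it char by char)
def pvRegexCharsA : List Char :=
  ['[', '.', '*', '+', '?', '^', '$', '{', '}', '(', ')', '|', '[', '\\', ']', '\\', '\\', ']']

-- A's while-loop over index i, as structural recursion on the remaining characters
-- (i += 2 consumes two characters, i += 1 one)
def escape_regex_pattern : List Char → List Char
  | [] => []
  | [c] => if pvRegexCharsA.contains c then ['\\', c] else [c]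
  | c :: d :: rest =>
    if c = '\\' then c :: d :: escape_regex_pattern rest
    else if pvRegexCharsA.contains c then '\\' :: c :: escape_regex_pattern (d :: rest)
    else c :: escape_regex_pattern (d :: rest)

def smart_pattern_handling (pattern : String) : String × Bool :=
  -- 'char in pattern' for the single characters of regex_chars is character membership (exact);
  -- startswith('/') / endswith('/') are ported on the code-point list with the literal ['/']
  let has_regex_chars := pvRegexCharsA.any (fun c => pattern.toList.contains c)
  if PySem.Chars.startswith pattern.toList ['/'] && PySem.Chars.endswith pattern.toList ['/'] &&
      decide (2 < PySem.Chars.len pattern.toList) then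
    (String.ofList (PySem.List.slice pattern.toList (some 1) (some (-1))), true)
  else if has_regex_chars then
    (pattern, true)
  else
    (String.ofList (escape_regex_pattern pattern.toList), false)

-- ===== PORT B =====
-- the 14 distinct special characters of B's literal '[.*+?^${}()|\]'
def pvSpecialB : List Char :=
  ['[', '.', '*', '+', '?', '^', '$', '{', '}', '(', ')', '|', '\\', ']']

def smart_pattern_handling_alt (pattern : String) : String × Bool :=
  let cs := pattern.toList
  if 2 < cs.length ∧ PySem.List.pyGet? cs 0 = some '/' ∧ PySem.List.pyGet? cs (-1) = some '/' then
    (String.ofList (PySem.List.slice cs (some 1) (some (-1))), true)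
  else if cs.any (fun c => pvSpecialB.contains c) then
    (pattern, true)
  else
    (pattern, false)

-- ===== PRECONDITION & SPEC =====
def Spec_smart_pattern_handling (pattern : String) (out : String × Bool) : Prop := out = smart_pattern_handling_alt pattern
instance (pattern : String) (out : String × Bool) : Decidable (Spec_smart_pattern_handling pattern out) := by unfold Spec_smart_pattern_handling; infer_instance

-- ===== CLAIM (what is proved, stated in full; the proofs are below) =====
def Claim_equal_smart_pattern_handling : Prop := ∀ (pattern : String), Dom_smart_pattern_handling pattern → Spec_smart_pattern_handling pattern (smart_pattern_handling pattern)

-- ===== LEMMAS AND PROOFS =====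

-- A's 18-character constant and B's 14-character literal hold the same characters
lemma mem_regexCharsA_iff (c : Char) : c ∈ pvRegexCharsA ↔ c ∈ pvSpecialB := by
  simp [pvRegexCharsA, pvSpecialB]; tauto

-- the two 'any' scans agree: both say "some character of the pattern is special"
lemma any_eq (cs : List Char) :
    pvRegexCharsA.any (fun c => cs.contains c) = cs.any (fun c => pvSpecialB.contains c) := by
  rw [Bool.eq_iff_iff]
  simp only [List.any_eq_true, List.contains_eq_mem, decide_eq_true_eq]
  constructor
  · rintro ⟨c, hA, hcs⟩; exact ⟨c, hcs, (mem_regexCharsA_iff c).mp hA⟩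
  · rintro ⟨c, hcs, hB⟩; exact ⟨c, (mem_regexCharsA_iff c).mpr hB, hcs⟩

-- on a pattern without special characters (in particular without backslash) A's escape loop is the identity
lemma escape_id : ∀ cs : List Char, (∀ c ∈ cs, c ∉ pvRegexCharsA) → escape_regex_pattern cs = cs
  | [], _ => rfl
  | [c], h => by
      have hc : c ∉ pvRegexCharsA := h c (by simp)
      simp [escape_regex_pattern, List.contains_eq_mem, hc]
  | c :: d :: rest, h => by
      have hc : c ∉ pvRegexCharsA := h c (by simp)
      have hcb : ¬ c = '\\' := fun e => hc (by rw [e]; decide)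
      simp only [escape_regex_pattern, if_neg hcb, List.contains_eq_mem, decide_eq_true_eq,
        if_neg hc, List.cons.injEq, true_and]
      exact escape_id (d :: rest) (fun x hx => h x (List.mem_cons_of_mem _ hx))

-- pattern.startswith('/') is "the first character is '/'"
lemma prefix_iff (cs : List Char) : ['/'] <+: cs ↔ PySem.List.pyGet? cs 0 = some '/' := by
  cases cs with
  | nil => simp [PySem.List.pyGet?, PySem.List.pyIdx?]
  | cons a l => simp [PySem.List.pyGet?, PySem.List.pyIdx?, List.cons_prefix_cons, eq_comm]

-- pattern.endswith('/') is "the last character is '/'"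
lemma suffix_iff (cs : List Char) : ['/'] <:+ cs ↔ PySem.List.pyGet? cs (-1) = some '/' := by
  rcases cs.eq_nil_or_concat with h | ⟨ys, y, h⟩ <;> subst h
  · simp [PySem.List.pyGet?, PySem.List.pyIdx?]
  · rw [List.concat_eq_append, PySem.List.pyGet?_neg_one_append_singleton]
    constructor
    · rintro ⟨t, ht⟩
      rcases List.eq_nil_or_concat t with rfl | ⟨u, x, rfl⟩
      · simpa using (congrArg List.getLast? ht).symm
      · simpa using (congrArg List.getLast? ht).symm
    · rintro h
      exact ⟨ys, by simp [Option.some.inj h]⟩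

-- the slash-delimited tests of A and of B are the same condition
lemma slash_cond_iff (cs : List Char) :
    (PySem.Chars.startswith cs ['/'] && PySem.Chars.endswith cs ['/'] &&
      decide (2 < PySem.Chars.len cs)) = true ↔
    (2 < cs.length ∧ PySem.List.pyGet? cs 0 = some '/' ∧ PySem.List.pyGet? cs (-1) = some '/') := by
  simp only [Bool.and_eq_true, decide_eq_true_eq, PySem.Chars.startswith_iff,
    PySem.Chars.endswith_iff, PySem.Chars.len_eq, prefix_iff, suffix_iff]
  constructor
  · rintro ⟨⟨h0, h1⟩, h2⟩; exact ⟨by exact_mod_cast h2, h0, h1⟩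
  · rintro ⟨h0, h1, h2⟩; exact ⟨⟨h1, h2⟩, by exact_mod_cast h0⟩

-- ===== VERDICT (by name: the statement is the Claim_ definition above) =====
theorem smart_pattern_handling_spec : Claim_equal_smart_pattern_handling := by
  intro pattern _
  unfold Spec_smart_pattern_handling smart_pattern_handling smart_pattern_handling_alt
  by_cases hs : (2 < pattern.toList.length ∧ PySem.List.pyGet? pattern.toList 0 = some '/' ∧
      PySem.List.pyGet? pattern.toList (-1) = some '/')
  · rw [if_pos ((slash_cond_iff pattern.toList).mpr hs), if_pos hs]
  · rw [if_neg (fun h => hs ((slash_cond_iff pattern.toList).mp h)), if_neg hs]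
    by_cases ha : pattern.toList.any (fun c => pvSpecialB.contains c) = true
    · rw [any_eq, if_pos ha, if_pos ha]
    · rw [any_eq, if_neg ha, if_neg ha]
      have hnone : ∀ c ∈ pattern.toList, c ∉ pvRegexCharsA := by
        intro c hc hmem
        exact ha (by
          simp only [List.any_eq_true, List.contains_eq_mem, decide_eq_true_eq]
          exact ⟨c, hc, (mem_regexCharsA_iff c).mp hmem⟩)
      rw [escape_id pattern.toList hnone]
      simp
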